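-- pv_equiv track=rewrite | github.com/zoey-holt/CodingProblems | CodingProblemsPython/leet_code_problems.py | get_one_group_indicies
-- ===== SOURCE A (Python) =====
-- from typing import List
--
-- def get_one_group_indicies(nums: List[int]) -> List[int]:
--     group_indicies = []
--     in_one_group = False
--     one_group = []
--     for i, n in enumerate(nums):
--         if not in_one_group and n == 1:
--             one_group.append(i)
--             in_one_group = True
--         if in_one_group and n == 0:
--             one_group.append(i)
--             group_indicies.append(one_group)
--             in_one_group = False
--             one_group = []
--     if one_group:
--         one_group.append(len(nums))
--         group_indicies.append(one_group)
--     return group_indicies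
-- ===== SOURCE B (Python) =====
-- from typing import List
--
-- def get_one_group_indicies(nums: List[int]) -> List[int]:
--     res = []
--     i = 0
--     n = len(nums)
--     while i < n:
--         if nums[i] == 1:
--             start = i
--             while i < n and nums[i] != 0:
--                 i += 1
--             res.append([start, i])
--             i += 1
--         else:
--             i += 1
--     return res
-- ===== Notes on version B (the rewrite author's own statement) =====
-- stated objective: simpler
-- what changed: Replaces the boolean-flag single pass with an accumulated partial group by a two-pointer run-consuming scan: when a 1 is seen, an inner while consumes the run up to the first 0 (or end) and emits [start, i] directly, so no in-group flag or pending-group list is maintained.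
import Mathlib
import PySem

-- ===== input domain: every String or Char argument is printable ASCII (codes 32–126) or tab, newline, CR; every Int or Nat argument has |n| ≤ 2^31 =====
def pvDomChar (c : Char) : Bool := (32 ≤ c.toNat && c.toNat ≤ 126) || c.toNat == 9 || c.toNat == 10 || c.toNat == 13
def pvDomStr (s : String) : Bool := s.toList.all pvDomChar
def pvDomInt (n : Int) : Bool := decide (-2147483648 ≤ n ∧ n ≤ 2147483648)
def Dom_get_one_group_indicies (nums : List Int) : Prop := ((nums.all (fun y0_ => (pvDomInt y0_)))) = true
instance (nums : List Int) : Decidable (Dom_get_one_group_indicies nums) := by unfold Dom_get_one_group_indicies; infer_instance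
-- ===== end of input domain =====

-- B replaces A's boolean-flag single pass with a two-pointer run-consuming scan (simpler: no flag/pending-group state).

-- ===== PORT A =====
-- Python's enumerate(nums), with the running index made explicit.
def pyEnumFrom (k : Nat) : List Int → List (Nat × Int)
  | [] => []
  | x :: xs => (k, x) :: pyEnumFrom (k + 1) xs

-- one iteration of A's for-loop body over the state (group_indicies, in_one_group, one_group)
def aStep : List (List Int) × Bool × List Int → Nat × Int → List (List Int) × Bool × List Int
  | (gi, ing, og), (i, n) =>
    let (ing₁, og₁) := if ing = false ∧ n = 1 then (true, og ++ [(i : Int)]) else (ing, og)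
    if ing₁ = true ∧ n = 0 then (gi ++ [og₁ ++ [(i : Int)]], false, ([] : List Int)) else (gi, ing₁, og₁)

-- A's trailing 'if one_group: …' block
def aFinal (len : Nat) (st : List (List Int) × Bool × List Int) : List (List Int) :=
  if st.2.2 ≠ [] then st.1 ++ [st.2.2 ++ [(len : Int)]] else st.1

def get_one_group_indicies (nums : List Int) : List (List Int) :=
  aFinal nums.length (List.foldl aStep ([], false, []) (pyEnumFrom 0 nums))

-- ===== PORT B =====
-- the inner 'while i < n and nums[i] != 0: i += 1' of B, returning the stopping index;
-- the fuel argument only makes the index loop structurally recursive (nums.length - i steps suffice)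
def bInner (nums : List Int) : Nat → Nat → Nat
  | 0, i => i
  | f + 1, i =>
    if h : i < nums.length then
      if nums[i] = 0 then i else bInner nums f (i + 1)
    else i

-- the outer while-loop of B (again fuel-guarded; nums.length + 1 - i steps suffice)
def bOuter (nums : List Int) : Nat → Nat → List (List Int)
  | 0, _ => []
  | f + 1, i =>
    if h : i < nums.length then
      if nums[i] = 1 then
        [(i : Int), (bInner nums (nums.length - i) i : Int)] ::
          bOuter nums f (bInner nums (nums.length - i) i + 1)
      else bOuter nums f (i + 1)
    else []

def get_one_group_indicies_alt (nums : List Int) : List (List Int) :=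
  bOuter nums (nums.length + 1) 0

-- ===== PRECONDITION & SPEC =====
def Spec_get_one_group_indicies (nums : List Int) (out : List (List Int)) : Prop := out = get_one_group_indicies_alt nums
instance (nums : List Int) (out : List (List Int)) : Decidable (Spec_get_one_group_indicies nums out) := by unfold Spec_get_one_group_indicies; infer_instance

-- ===== CLAIM (what is proved, stated in full; the proofs are below) =====
def Claim_equal_get_one_group_indicies : Prop := ∀ (nums : List Int), Dom_get_one_group_indicies nums → Spec_get_one_group_indicies nums (get_one_group_indicies nums)

-- ===== LEMMAS AND PROOFS =====

-- proof-side abbreviations: the two loops started with adequate fuel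
def Bi (nums : List Int) (i : Nat) : Nat := bInner nums (nums.length - i) i
def BO (nums : List Int) (i : Nat) : List (List Int) := bOuter nums (nums.length + 1 - i) i

theorem bInner_ge (nums : List Int) : ∀ (f i : Nat), i ≤ bInner nums f i := by
  intro f
  induction f with
  | zero => intro i; simp [bInner]
  | succ f ih =>
    intro i
    simp only [bInner]
    split_ifs with h h0
    · omega
    · exact le_trans (by omega) (ih (i + 1))
    · omega

theorem Bi_ge (nums : List Int) (i : Nat) : i ≤ Bi nums i := bInner_ge nums _ i

theorem Bi_stop (nums : List Int) (i : Nat) (h : ¬ i < nums.length) : Bi nums i = i := by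
  unfold Bi
  have : nums.length - i = 0 := by omega
  rw [this, bInner]

theorem Bi_zero (nums : List Int) (i : Nat) (h : i < nums.length) (h0 : nums[i] = 0) :
    Bi nums i = i := by
  unfold Bi
  have hf : nums.length - i = (nums.length - (i + 1)) + 1 := by omega
  rw [hf, bInner]
  simp [h, h0]

theorem Bi_succ (nums : List Int) (i : Nat) (h : i < nums.length) (h0 : nums[i] ≠ 0) :
    Bi nums i = Bi nums (i + 1) := by
  unfold Bi
  have hf : nums.length - i = (nums.length - (i + 1)) + 1 := by omega
  rw [hf, bInner]
  simp [h, h0]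

theorem bOuter_congr (nums : List Int) : ∀ (f₁ f₂ i : Nat),
    nums.length - i < f₁ → nums.length - i < f₂ → bOuter nums f₁ i = bOuter nums f₂ i := by
  intro f₁
  induction f₁ with
  | zero => intro f₂ i h1 _; omega
  | succ f ih =>
    intro f₂ i h1 h2
    match f₂ with
    | 0 => omega
    | t + 1 =>
      simp only [bOuter]
      split_ifs with h hone
      · have hJ : i ≤ bInner nums (nums.length - i) i := bInner_ge nums _ i
        exact congrArg _ (ih t _ (by omega) (by omega))
      · exact ih t (i + 1) (by omega) (by omega)
      · rfl

theorem bOuter_stop_any (nums : List Int) : ∀ (f j : Nat), ¬ j < nums.length → bOuter nums f j = [] := by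
  intro f j h
  match f with
  | 0 => rw [bOuter]
  | t + 1 => rw [bOuter]; simp [h]

theorem BO_stop (nums : List Int) (i : Nat) (h : ¬ i < nums.length) : BO nums i = [] :=
  bOuter_stop_any nums _ i h

theorem BO_one (nums : List Int) (i : Nat) (h : i < nums.length) (h1 : nums[i] = 1) :
    BO nums i = [(i : Int), (Bi nums i : Int)] :: BO nums (Bi nums i + 1) := by
  have hJ : i ≤ Bi nums i := Bi_ge nums i
  unfold BO
  have hf : nums.length + 1 - i = (nums.length - i) + 1 := by omega
  rw [hf, bOuter]
  simp only [h, dif_pos, h1, if_pos]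
  have hEq : bInner nums (nums.length - i) i = Bi nums i := rfl
  rw [hEq]
  by_cases hJl : Bi nums i < nums.length
  · exact congrArg _ (bOuter_congr nums _ _ _ (by omega) (by omega))
  · rw [bOuter_stop_any nums _ _ (by omega), bOuter_stop_any nums (nums.length + 1 - (Bi nums i + 1)) (Bi nums i + 1) (by omega)]

theorem BO_skip (nums : List Int) (i : Nat) (h : i < nums.length) (h1 : nums[i] ≠ 1) :
    BO nums i = BO nums (i + 1) := by
  unfold BO
  have hf : nums.length + 1 - i = (nums.length - i) + 1 := by omega
  rw [hf, bOuter]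
  simp only [h, dif_pos, h1]
  exact bOuter_congr nums _ _ _ (by omega) (by omega)

-- the combined loop invariant: A's fold from index k, in either reachable state,
-- produces what B's scan produces from index k
theorem main_inv (nums : List Int) : ∀ (l : List Int) (k : Nat),
    l = nums.drop k → k ≤ nums.length →
    (∀ gi : List (List Int),
        aFinal nums.length (List.foldl aStep (gi, false, []) (pyEnumFrom k l))
          = gi ++ BO nums k) ∧
    (∀ (gi : List (List Int)) (s : Int),
        aFinal nums.length (List.foldl aStep (gi, true, [s]) (pyEnumFrom k l))
          = gi ++ ([s, (Bi nums k : Int)] :: BO nums (Bi nums k + 1))) := by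
  intro l
  induction l with
  | nil =>
    intro k hd hk
    have hlen : nums.length ≤ k := by
      have := congrArg List.length hd
      simp [List.length_drop] at this
      omega
    have hnotlt : ¬ k < nums.length := by omega
    constructor
    · intro gi
      simp [pyEnumFrom, aFinal, BO_stop nums k hnotlt]
    · intro gi s
      have hk' : k = nums.length := by omega
      subst hk'
      have h1 : Bi nums nums.length = nums.length := Bi_stop nums _ (by omega)
      simp [pyEnumFrom, aFinal, h1, BO_stop nums (nums.length + 1) (by omega)]
  | cons n l' ih =>
    intro k hd hk
    have hlt : k < nums.length := by
      by_contra hcon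
      rw [List.drop_eq_nil_of_le (by omega)] at hd
      simp at hd
    have hdk : nums.drop k = nums[k] :: nums.drop (k + 1) := List.drop_eq_getElem_cons hlt
    have hinj := hd.trans hdk
    injection hinj with hn hl'
    subst hl'
    have hk1 : k + 1 ≤ nums.length := by omega
    obtain ⟨ihF, ihT⟩ := ih (k + 1) rfl hk1
    constructor
    · -- state (gi, false, [])
      intro gi
      by_cases h1 : n = 1
      · -- enter a group
        have h1' : nums[k] = 1 := hn.symm.trans h1
        have hne : nums[k] ≠ 0 := fun hc => one_ne_zero (h1'.symm.trans hc)
        have step_eq : aStep (gi, false, []) (k, n) = (gi, true, [(k : Int)]) := by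
          simp [aStep, h1]
        rw [pyEnumFrom, List.foldl_cons, step_eq, ihT gi (k : Int)]
        rw [BO_one nums k hlt h1', Bi_succ nums k hlt hne]
      · -- stay out of a group
        have h1' : nums[k] ≠ 1 := fun hc => h1 (hn.trans hc)
        have step_eq : aStep (gi, false, []) (k, n) = (gi, false, []) := by
          simp [aStep, h1]
        rw [pyEnumFrom, List.foldl_cons, step_eq, ihF gi]
        rw [BO_skip nums k hlt h1']
    · -- state (gi, true, [s])
      intro gi s
      by_cases h0 : n = 0
      · -- close the group at k
        have h0' : nums[k] = 0 := hn.symm.trans h0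
        have step_eq : aStep (gi, true, [s]) (k, n) = (gi ++ [[s, (k : Int)]], false, []) := by
          simp [aStep, h0]
        rw [pyEnumFrom, List.foldl_cons, step_eq, ihF (gi ++ [[s, (k : Int)]])]
        rw [Bi_zero nums k hlt h0']
        simp
      · -- continue the group
        have h0' : nums[k] ≠ 0 := fun hc => h0 (hn.trans hc)
        have step_eq : aStep (gi, true, [s]) (k, n) = (gi, true, [s]) := by
          simp [aStep, h0]
        rw [pyEnumFrom, List.foldl_cons, step_eq, ihT gi s]
        rw [Bi_succ nums k hlt h0']

-- ===== VERDICT (by name: the statement is the Claim_ definition above) =====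
theorem get_one_group_indicies_spec : Claim_equal_get_one_group_indicies := by
  intro nums _
  unfold Spec_get_one_group_indicies get_one_group_indicies
  have h := (main_inv nums nums 0 (by simp) (by omega)).1 []
  simpa [BO, get_one_group_indicies_alt] using h
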